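-- pv_equiv track=rewrite | github.com/knalin55/CUNI_Wue-WebNLG23_Submission | generate.py | split_triples
-- ===== SOURCE A (Python) =====
-- def split_triples(triplet_list, split_type="subject", chunk_size=2):
--
--   if split_type == "subject":
--     subject_dict = {}
--     final_output = list()
--
--     for triplet in triplet_list:
--         # Split each triplet into subject, predicate and object
--         subject, predicate, obj = triplet.split(' | ')
--         # Strip whitespaces from the subject
--         subject = subject.strip()
--         # Add subject not in the dictionary
--         if subject not in subject_dict:
--             subject_dict[subject] = []
--         # Add the triplet to the list corresponding to the subject
--         subject_dict[subject].append(triplet)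
--
--     # Now, if you want the output as a list of lists:
--     output = list(subject_dict.values())
--
--     for o in output:
--         o_ = [" ## ".join(o[i:i + chunk_size]) for i in range(0, len(o), chunk_size)]
--         for sub_o in o_:
--             final_output.append(sub_o)
--     return final_output
--
--   elif split_type == "single":
--     return triplet_list
--
--   else:
--     return [" ## ".join(triplet_list)]
-- ===== SOURCE B (Python) =====
-- def split_triples(triplet_list, split_type="subject", chunk_size=2):
--     if split_type == "subject":
--         # Pass 1: ordered list of distinct subjects (first appearance order).
--         subjects = []
--         for triplet in triplet_list:
--             subject, predicate, obj = triplet.split(' | ')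
--             subject = subject.strip()
--             if subject not in subjects:
--                 subjects.append(subject)
--         # Pass 2: for each subject, collect its triplets and chunk them.
--         final_output = []
--         for subject in subjects:
--             group = [t for t in triplet_list if t.split(' | ')[0].strip() == subject]
--             for i in range(0, len(group), chunk_size):
--                 final_output.append(" ## ".join(group[i:i + chunk_size]))
--         return final_output
--     elif split_type == "single":
--         return triplet_list
--     else:
--         return [" ## ".join(triplet_list)]
-- ===== Notes on version B (the rewrite author's own statement) =====
-- stated objective: alternative
-- what changed: Replaces A's dict-of-lists grouping (single pass building subject->triplets, then chunking dict values) with a two-phase strategy: one pass collects distinct subjects in first-appearance order, then each subject's group is recollected by rescanning the list before chunking.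
import Mathlib
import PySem

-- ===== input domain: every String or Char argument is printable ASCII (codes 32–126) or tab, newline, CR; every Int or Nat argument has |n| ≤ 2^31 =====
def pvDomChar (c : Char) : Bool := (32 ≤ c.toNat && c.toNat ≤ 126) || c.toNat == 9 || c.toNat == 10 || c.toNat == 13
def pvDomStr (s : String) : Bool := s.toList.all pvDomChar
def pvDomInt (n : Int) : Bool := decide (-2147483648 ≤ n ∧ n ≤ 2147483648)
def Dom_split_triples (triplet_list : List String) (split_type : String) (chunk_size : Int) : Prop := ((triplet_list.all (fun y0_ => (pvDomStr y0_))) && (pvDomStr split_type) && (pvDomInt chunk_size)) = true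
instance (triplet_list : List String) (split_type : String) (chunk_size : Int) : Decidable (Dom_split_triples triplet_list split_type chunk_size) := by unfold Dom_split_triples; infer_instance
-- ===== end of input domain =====

-- B replaces A's one-pass dict-of-lists grouping by a build-distinct-subjects pass followed by a
-- rescan per subject (alternative decomposition; return values proved identical on Pre_).

-- subject of a triplet: first ' | '-field, stripped (shared by both ports, as in both Pythons)
def pvSubj (t : String) : String := PySem.Str.strip (((PySem.Str.split? t " | ").getD []).headD "")

-- the chunking comprehension [" ## ".join(o[i:i+c]) for i in range(0, len(o), c)] (identical in both Pythons)
def pvChunks (o : List String) (c : Int) : List String :=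
  (PySem.List.pyRange 0 (o.length : Int) c).map
    (fun i => PySem.Str.join " ## " (PySem.List.slice o (some i) (some (i + c))))

-- ===== PORT A =====
def split_triples (triplet_list : List String) (split_type : String) (chunk_size : Int) : List String :=
  if split_type = "subject" then
    let d : PySem.Dict String (List String) :=
      triplet_list.foldl (fun d t =>
        let s := pvSubj t
        let d := if d.contains s then d else d.insert s []
        d.modify s [] (· ++ [t])) PySem.Dict.empty
    let output := d.values
    output.foldl (fun acc o => acc ++ pvChunks o chunk_size) []
  else if split_type = "single" then triplet_list
  else [PySem.Str.join " ## " triplet_list]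

-- ===== PORT B =====
def split_triples_alt (triplet_list : List String) (split_type : String) (chunk_size : Int) : List String :=
  if split_type = "subject" then
    let subjects := triplet_list.foldl (fun acc t =>
      let s := pvSubj t
      if s ∈ acc then acc else acc ++ [s]) []
    subjects.flatMap (fun s =>
      pvChunks (triplet_list.filter (fun t => pvSubj t == s)) chunk_size)
  else if split_type = "single" then triplet_list
  else [PySem.Str.join " ## " triplet_list]

-- ===== PRECONDITION & SPEC =====
-- Pre_ excludes exactly the inputs where A raises: in "subject" mode, a triplet that does not
-- split into exactly 3 parts on ' | ' (ValueError on unpacking), and chunk_size = 0 with a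
-- nonempty list (range() with step 0 raises ValueError).
def Pre_split_triples (triplet_list : List String) (split_type : String) (chunk_size : Int) : Prop :=
  split_type = "subject" →
    ((∀ t ∈ triplet_list, ((PySem.Str.split? t " | ").getD []).length = 3) ∧
     (chunk_size ≠ 0 ∨ triplet_list = []))
instance (triplet_list : List String) (split_type : String) (chunk_size : Int) : Decidable (Pre_split_triples triplet_list split_type chunk_size) := by unfold Pre_split_triples; infer_instance

def pvWitness_split_triples : List String × String × Int :=
  (["A | p | x", "B | q | y", "A | r | z"], "subject", 2)

def Spec_split_triples (triplet_list : List String) (split_type : String) (chunk_size : Int) (out : List String) : Prop := out = split_triples_alt triplet_list split_type chunk_size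
instance (triplet_list : List String) (split_type : String) (chunk_size : Int) (out : List String) : Decidable (Spec_split_triples triplet_list split_type chunk_size out) := by unfold Spec_split_triples; infer_instance

-- ===== CLAIM (what is proved, stated in full; the proofs are below) =====
def Claim_equal_split_triples : Prop := ∀ (triplet_list : List String) (split_type : String) (chunk_size : Int), Dom_split_triples triplet_list split_type chunk_size → Pre_split_triples triplet_list split_type chunk_size → Spec_split_triples triplet_list split_type chunk_size (split_triples triplet_list split_type chunk_size)

-- ===== LEMMAS AND PROOFS =====

-- A's loop body, named
def pvAStep (d : PySem.Dict String (List String)) (t : String) : PySem.Dict String (List String) :=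
  let s := pvSubj t
  let d := if d.contains s then d else d.insert s []
  d.modify s [] (· ++ [t])

-- B's seen-list step, named
def pvBStep (acc : List String) (t : String) : List String :=
  let s := pvSubj t
  if s ∈ acc then acc else acc ++ [s]

theorem pvAStep_keys (d : PySem.Dict String (List String)) (t : String) :
    (pvAStep d t).keys = pvBStep d.keys t := by
  by_cases hc : d.contains (pvSubj t) = true
  · have hm : pvSubj t ∈ d.keys := (PySem.Dict.contains_iff_mem_keys d (pvSubj t)).mp hc
    simp [pvAStep, pvBStep, hc, hm, PySem.Dict.keys_modify,
          PySem.Dict.keys_insert_of_contains d _ hc]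
  · have hc' : d.contains (pvSubj t) = false := by simpa using hc
    have hm : pvSubj t ∉ d.keys := fun h => hc ((PySem.Dict.contains_iff_mem_keys d (pvSubj t)).mpr h)
    simp [pvAStep, pvBStep, hc', hm, PySem.Dict.keys_modify,
          PySem.Dict.keys_insert_of_contains (d.insert (pvSubj t) []) _
            (PySem.Dict.contains_insert_self d (pvSubj t) []),
          PySem.Dict.keys_insert_of_not_contains d _ hc']

theorem pvAStep_getD (d : PySem.Dict String (List String)) (t c : String) :
    (pvAStep d t).getD c [] = if pvSubj t == c then d.getD c [] ++ [t] else d.getD c [] := by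
  by_cases hc : d.contains (pvSubj t) = true
  · by_cases hcs : pvSubj t = c
    · subst hcs
      simp [pvAStep, hc, PySem.Dict.getD_modify_self]
    · have hne : c ≠ pvSubj t := fun h => hcs h.symm
      simp [pvAStep, hc, hcs, PySem.Dict.getD_modify_of_ne d _ _ hne]
  · have hc' : d.contains (pvSubj t) = false := by simpa using hc
    by_cases hcs : pvSubj t = c
    · subst hcs
      simp [pvAStep, hc', PySem.Dict.getD_modify_self, PySem.Dict.getD_insert_self,
            PySem.Dict.getD_of_not_contains d _ hc']
    · have hne : c ≠ pvSubj t := fun h => hcs h.symm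
      simp [pvAStep, hc', hcs, PySem.Dict.getD_modify_of_ne _ _ _ hne,
            PySem.Dict.getD_insert_of_ne d _ _ hne]

theorem pv_fold_keys (tl : List String) (d : PySem.Dict String (List String)) :
    (tl.foldl pvAStep d).keys = tl.foldl pvBStep d.keys := by
  induction tl generalizing d with
  | nil => rfl
  | cons t ts ih => simp [List.foldl, ih, pvAStep_keys]

theorem pv_fold_getD (tl : List String) (d : PySem.Dict String (List String)) (c : String) :
    (tl.foldl pvAStep d).getD c [] = d.getD c [] ++ tl.filter (fun t => pvSubj t == c) := by
  induction tl generalizing d with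
  | nil => simp
  | cons t ts ih =>
    simp only [List.foldl, ih, pvAStep_getD, List.filter]
    by_cases h : pvSubj t == c <;> simp [h]

theorem pv_bstep_nodup (tl : List String) (acc : List String) (h : acc.Nodup) :
    (tl.foldl pvBStep acc).Nodup := by
  induction tl generalizing acc with
  | nil => exact h
  | cons t ts ih =>
    apply ih
    simp only [pvBStep]
    split
    · exact h
    · next hmem =>
        simp_all [List.nodup_append]
        intro a ha he
        exact hmem (he ▸ ha)

theorem pv_fold_nodup (tl : List String) :
    (tl.foldl pvAStep PySem.Dict.empty).keys.Nodup := by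
  rw [pv_fold_keys]
  exact pv_bstep_nodup tl _ (by simp [PySem.Dict.keys_empty])

theorem split_triples_spec : Claim_equal_split_triples := by
  intro tl st ch _ _
  unfold Spec_split_triples split_triples split_triples_alt
  by_cases h1 : st = "subject"
  · simp only [h1]
    simp only [if_true]
    have hvals : (tl.foldl pvAStep PySem.Dict.empty).values
        = (tl.foldl pvBStep []).map (fun c => tl.filter (fun t => pvSubj t == c)) := by
      rw [PySem.Dict.values_eq_map_keys _ (pv_fold_nodup tl) []]
      rw [pv_fold_keys]
      simp [pv_fold_getD, PySem.Dict.keys_empty, PySem.Dict.getD_empty]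
    show (List.foldl pvAStep PySem.Dict.empty tl).values.foldl _ [] = _
    rw [hvals, PySem.List.foldl_append_eq_flatMap]
    simp only [List.flatMap_map, List.nil_append]
    rfl
  · simp [h1]
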